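-- pv_equiv track=rewrite | github.com/4kuma/Compiler | kompilator/src/ast.py | generate_number
-- ===== SOURCE A (Python) =====
-- def negate_number() -> str:
--     return 'STORE 1' + '\n' + 'SUB 0\nSUB 1' + '\n'
--
-- def generate_number(x: int, destination_register) -> str:
--     one_register: int = 1
--     result: str = f'SUB 0' + '\n' + f'INC' + '\n' + f'STORE {one_register}' + '\n' + 'DEC' + '\n'
--
--     is_negative = x < 0
--     x = abs(x)
--
--     for digit in bin(x)[2:-1]:
--         if digit == '1':
--             result = result + 'INC\n' + f'SHIFT {one_register}' + '\n'
--         elif digit == '0':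
--             result = result + f'SHIFT {one_register}' + '\n'
--     if bin(x)[-1] == '1':
--         result = result + f'INC' + '\n'
--
--     if is_negative:
--         result = result + negate_number()
--
--     if destination_register != 0:
--         result = result + f'STORE {destination_register}' + '\n'
--
--     return result
-- ===== SOURCE B (Python) =====
-- def generate_number(x: int, destination_register) -> str:
--     parts = ['SUB 0\nINC\nSTORE 1\nDEC\n']
--
--     def emit(n):
--         # recurse on the value itself: high bits first, SHIFT before each
--         # bit after the first, INC for every set bit
--         if n > 1:
--             emit(n // 2)
--             parts.append('SHIFT 1\n')
--         if n % 2 == 1: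
--             parts.append('INC\n')
--
--     emit(abs(x))
--     if x < 0:
--         parts.append('STORE 1\nSUB 0\nSUB 1\n')
--     if destination_register != 0:
--         parts.append('STORE %d\n' % destination_register)
--     return ''.join(parts)
-- ===== Notes on version B (the rewrite author's own statement) =====
-- stated objective: simpler
-- what changed: B drops the bin()-string slicing ([2:-1] loop plus separate [-1] last-bit branch) and instead recurses on the integer itself (n//2, n%2), emitting SHIFT before every bit after the first and INC for each set bit, collecting parts in a list joined once.
import Mathlib
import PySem

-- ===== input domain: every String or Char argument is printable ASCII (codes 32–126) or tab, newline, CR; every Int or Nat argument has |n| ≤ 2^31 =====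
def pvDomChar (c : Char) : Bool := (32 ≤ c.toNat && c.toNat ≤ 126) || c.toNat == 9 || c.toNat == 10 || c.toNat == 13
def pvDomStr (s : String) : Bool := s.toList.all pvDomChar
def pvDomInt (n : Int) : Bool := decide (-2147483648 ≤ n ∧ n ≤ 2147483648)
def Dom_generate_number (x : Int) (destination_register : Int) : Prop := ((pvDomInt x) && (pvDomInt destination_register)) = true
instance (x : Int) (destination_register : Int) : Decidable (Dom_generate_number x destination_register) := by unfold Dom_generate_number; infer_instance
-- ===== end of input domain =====

-- B replaces A's bin()-string slicing ([2:-1] loop plus a separate [-1] branch) by a direct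
-- recursion on the integer (n//2, n%2); same cost, simpler decomposition ("simpler").
-- Strings are built on the List Char side (PySem convention) and packed with String.ofList.

-- ===== PORT A =====
def negate_number : List Char :=
  "STORE 1".toList ++ "\n".toList ++ "SUB 0\nSUB 1".toList ++ "\n".toList

def generate_number (x : Int) (destination_register : Int) : String :=
  let one_register : Int := 1
  let result : List Char :=
    "SUB 0".toList ++ "\n".toList ++ "INC".toList ++ "\n".toList ++
      ("STORE ".toList ++ PySem.Int.toChars one_register) ++ "\n".toList ++
      "DEC".toList ++ "\n".toList
  let is_negative : Bool := decide (x < 0)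
  let x : Int := |x|
  let bs : List Char := PySem.Int.toBinChars0b x          -- bin(x)
  let result : List Char :=
    (PySem.List.slice bs (some 2) (some (-1))).foldl      -- bin(x)[2:-1]
      (fun r digit =>
        if digit = '1' then
          r ++ "INC\n".toList ++ ("SHIFT ".toList ++ PySem.Int.toChars one_register) ++ "\n".toList
        else if digit = '0' then
          r ++ ("SHIFT ".toList ++ PySem.Int.toChars one_register) ++ "\n".toList
        else r) result
  let result : List Char :=
    if PySem.List.pyGet? bs (-1) = some '1' then          -- bin(x)[-1] == '1' (bs never empty)
      result ++ "INC".toList ++ "\n".toList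
    else result
  let result : List Char := if is_negative then result ++ negate_number else result
  let result : List Char :=
    if destination_register ≠ 0 then
      result ++ ("STORE ".toList ++ PySem.Int.toChars destination_register) ++ "\n".toList
    else result
  String.ofList result

-- ===== PORT B =====
-- Python B's inner recursive 'emit(n)'; the fuel argument (first) only makes the n//2
-- recursion structural, it never changes the computed value (fuel = n suffices).
def emitBitsF : Nat → Nat → List Char
  | 0, _ => []
  | fuel + 1, n =>
    (if 1 < n then emitBitsF fuel (n / 2) ++ "SHIFT 1\n".toList else []) ++
      (if n % 2 == 1 then "INC\n".toList else [])

def emitBits (n : Nat) : List Char := emitBitsF n n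

def generate_number_alt (x : Int) (destination_register : Int) : String :=
  String.ofList
    ("SUB 0\nINC\nSTORE 1\nDEC\n".toList ++
      emitBits x.natAbs ++
      (if x < 0 then "STORE 1\nSUB 0\nSUB 1\n".toList else []) ++
      (if destination_register ≠ 0 then
        "STORE ".toList ++ PySem.Int.toChars destination_register ++ "\n".toList
      else []))

-- ===== PRECONDITION & SPEC =====
def Spec_generate_number (x : Int) (destination_register : Int) (out : String) : Prop := out = generate_number_alt x destination_register
instance (x : Int) (destination_register : Int) (out : String) : Decidable (Spec_generate_number x destination_register out) := by unfold Spec_generate_number; infer_instance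

-- ===== CLAIM (what is proved, stated in full; the proofs are below) =====
def Claim_equal_generate_number : Prop := ∀ (x : Int) (destination_register : Int), Dom_generate_number x destination_register → Spec_generate_number x destination_register (generate_number x destination_register)

-- ===== LEMMAS AND PROOFS =====

-- `Nat.toDigitsCore` with enough fuel is `Nat.toDigits` with the accumulator appended.
lemma toDigitsCore_eq : ∀ (n f : Nat) (ds : List Char), n < f →
    Nat.toDigitsCore 2 f n ds = Nat.toDigits 2 n ++ ds := by
  intro n
  induction n using Nat.strong_induction_on with
  | _ n ih =>
    intro f ds hf
    match f, hf with
    | f + 1, _ =>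
      rw [Nat.toDigitsCore]
      by_cases h2 : n / 2 = 0
      · rw [if_pos h2]
        have hb : n < 2 := by omega
        interval_cases n <;> rfl
      · rw [if_neg h2]
        have hlt : n / 2 < n := Nat.div_lt_self (by omega) (by omega)
        have hpeel : Nat.toDigits 2 n = Nat.toDigits 2 (n / 2) ++ [Nat.digitChar (n % 2)] := by
          rw [Nat.toDigits, Nat.toDigitsCore, if_neg h2,
            ih (n / 2) hlt n [Nat.digitChar (n % 2)] (by omega)]
        rw [ih (n / 2) hlt f (Nat.digitChar (n % 2) :: ds) (by omega), hpeel]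
        simp

lemma toDigits_two_peel (n : Nat) (h : 2 ≤ n) :
    Nat.toDigits 2 n = Nat.toDigits 2 (n / 2) ++ [Nat.digitChar (n % 2)] := by
  rw [Nat.toDigits, Nat.toDigitsCore]
  have h2 : ¬ n / 2 = 0 := by omega
  simp only [if_neg h2]
  rw [toDigitsCore_eq (n / 2) n [Nat.digitChar (n % 2)] (by omega)]

lemma emitBitsF_congr : ∀ (n f₁ f₂ : Nat), n ≤ f₁ → n ≤ f₂ → emitBitsF f₁ n = emitBitsF f₂ n := by
  intro n
  induction n using Nat.strong_induction_on with
  | _ n ih =>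
    intro f₁ f₂ h₁ h₂
    match f₁, f₂ with
    | 0, 0 => rfl
    | 0, f₂ + 1 => simp_all [emitBitsF]
    | f₁ + 1, 0 => simp_all [emitBitsF]
    | f₁ + 1, f₂ + 1 =>
      simp only [emitBitsF]
      by_cases h : 1 < n
      · rw [ih (n / 2) (Nat.div_lt_self (by omega) (by omega)) f₁ f₂ (by omega) (by omega)]
      · simp [h]

lemma emitBits_unfold (n : Nat) :
    emitBits n = (if 1 < n then emitBits (n / 2) ++ "SHIFT 1\n".toList else []) ++
      (if n % 2 == 1 then "INC\n".toList else []) := by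
  match n with
  | 0 => rfl
  | m + 1 =>
    show emitBitsF (m + 1) (m + 1) = _
    rw [emitBitsF]
    by_cases h : 1 < m + 1
    · rw [emitBitsF_congr ((m + 1) / 2) m ((m + 1) / 2) (by omega) (le_refl _)]
      rfl
    · simp [h]

-- what A's loop appends for one binary digit
def gA (digit : Char) : List Char :=
  if digit = '1' then
    "INC\n".toList ++ ("SHIFT ".toList ++ PySem.Int.toChars 1) ++ "\n".toList
  else if digit = '0' then
    ("SHIFT ".toList ++ PySem.Int.toChars 1) ++ "\n".toList
  else []

lemma foldl_gA (L init : List Char) :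
    L.foldl
      (fun r digit =>
        if digit = '1' then
          r ++ "INC\n".toList ++ ("SHIFT ".toList ++ PySem.Int.toChars 1) ++ "\n".toList
        else if digit = '0' then
          r ++ ("SHIFT ".toList ++ PySem.Int.toChars 1) ++ "\n".toList
        else r) init = init ++ L.flatMap gA := by
  induction L generalizing init with
  | nil => simp
  | cons d t ih =>
    rw [List.foldl_cons, ih, List.flatMap_cons]
    have : (if d = '1' then
          init ++ "INC\n".toList ++ ("SHIFT ".toList ++ PySem.Int.toChars 1) ++ "\n".toList
        else if d = '0' then
          init ++ ("SHIFT ".toList ++ PySem.Int.toChars 1) ++ "\n".toList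
        else init) = init ++ gA d := by
      unfold gA; split_ifs <;> simp
    rw [this, List.append_assoc]

lemma flatMap_gA (n : Nat) :
    (Nat.toDigits 2 n).flatMap gA = emitBits n ++ "SHIFT 1\n".toList := by
  induction n using Nat.strong_induction_on with
  | _ n ih =>
    by_cases h : 2 ≤ n
    · rw [toDigits_two_peel n h, List.flatMap_append,
        ih (n / 2) (Nat.div_lt_self (by omega) (by omega)), emitBits_unfold n]
      have hm : n % 2 = 0 ∨ n % 2 = 1 := by omega
      rcases hm with hm | hm <;>
        simp [hm, gA, if_pos (by omega : 1 < n)] <;> decide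
    · interval_cases n <;> decide

lemma bits_eq (n : Nat) :
    (Nat.toDigits 2 n).dropLast.flatMap gA ++
      (if (Nat.toDigits 2 n).getLast? = some '1' then "INC".toList ++ "\n".toList else []) =
    emitBits n := by
  by_cases h : 2 ≤ n
  · rw [toDigits_two_peel n h]
    rw [List.dropLast_concat, List.getLast?_concat, flatMap_gA, emitBits_unfold n,
      if_pos (by omega : 1 < n)]
    have hm : n % 2 = 0 ∨ n % 2 = 1 := by omega
    rcases hm with hm | hm <;> simp [hm] <;> decide
  · interval_cases n <;> decide

lemma toDigits_two_ne_nil (n : Nat) : Nat.toDigits 2 n ≠ [] := by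
  by_cases h : 2 ≤ n
  · rw [toDigits_two_peel n h]; simp
  · interval_cases n <;> decide

lemma slice_bin (D : List Char) :
    PySem.List.slice ('0' :: 'b' :: D) (some 2) (some (-1)) = D.dropLast := by
  simp [PySem.List.slice, PySem.List.clampIdx, List.dropLast_eq_take]
  split_ifs with h
  · omega
  · omega

-- ===== VERDICT (by name: the statement is the Claim_ definition above) =====
theorem generate_number_spec : Claim_equal_generate_number := by
  intro x dr _
  unfold Spec_generate_number generate_number generate_number_alt
  have hbs : PySem.Int.toBinChars0b |x| = '0' :: 'b' :: Nat.toDigits 2 x.natAbs := by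
    have htoNat : |x|.toNat = x.natAbs := by rw [Int.abs_eq_natAbs, Int.toNat_natCast]
    simp only [PySem.Int.toBinChars0b, if_neg (not_lt.mpr (abs_nonneg x)), htoNat]
  have hlast : PySem.List.pyGet? ('0' :: 'b' :: Nat.toDigits 2 x.natAbs) (-1)
      = (Nat.toDigits 2 x.natAbs).getLast? := by
    rw [PySem.List.pyGet?_neg_one]
    rcases hE : Nat.toDigits 2 x.natAbs with _ | ⟨a, t⟩
    · exact absurd hE (toDigits_two_ne_nil _)
    · simp [List.getLast?]
  simp only [hbs, slice_bin, hlast, foldl_gA]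
  rw [← bits_eq x.natAbs]
  have hL1 : ("SUB 0" : String).toList = ['S', 'U', 'B', ' ', '0'] := by decide
  have hL2 : ("\n" : String).toList = ['\n'] := by decide
  have hL3 : ("INC" : String).toList = ['I', 'N', 'C'] := by decide
  have hL4 : ("STORE " : String).toList = ['S', 'T', 'O', 'R', 'E', ' '] := by decide
  have hL5 : ("DEC" : String).toList = ['D', 'E', 'C'] := by decide
  have hL7 : ("SUB 0\nINC\nSTORE 1\nDEC\n" : String).toList = ['S', 'U', 'B', ' ', '0', '\n', 'I', 'N', 'C', '\n', 'S', 'T', 'O', 'R', 'E', ' ', '1', '\n', 'D', 'E', 'C', '\n'] := by decide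
  have hL8 : ("STORE 1\nSUB 0\nSUB 1\n" : String).toList = ['S', 'T', 'O', 'R', 'E', ' ', '1', '\n', 'S', 'U', 'B', ' ', '0', '\n', 'S', 'U', 'B', ' ', '1', '\n'] := by decide
  have hL9 : ("STORE 1" : String).toList = ['S', 'T', 'O', 'R', 'E', ' ', '1'] := by decide
  have hL10 : ("SUB 0\nSUB 1" : String).toList = ['S', 'U', 'B', ' ', '0', '\n', 'S', 'U', 'B', ' ', '1'] := by decide
  have hT1 : PySem.Int.toChars 1 = ['1'] := by decide
  simp only [decide_eq_true_eq]
  split_ifs <;>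
    simp [negate_number, hL1, hL2, hL3, hL4, hL5, hL7, hL8, hL9, hL10, hT1,
      List.append_assoc]
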